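-- pv_equiv track=rewrite | github.com/RemiH06/Metropoly | boardFactory.py | iterRingCoordinates
-- ===== SOURCE A (Python) =====
-- def iterRingCoordinates(size: int):
--     """
--     Yield all coordinates of a square ring of side 'size' in order,
--     starting at bottom-left corner and going clockwise.
--     """
--     last = size - 1
--
--     # bottom row: left -> right
--     for col in range(size):
--         yield (last, col)
--
--     # right column: bottom-1 -> top
--     for row in range(last - 1, -1, -1):
--         yield (row, last)
--
--     # top row: right-1 -> left
--     for col in range(last - 1, -1, -1):
--         yield (0, col)
--
--     # left column: top+1 -> bottom-1
--     for row in range(1, last):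
--         yield (row, 0)
-- ===== SOURCE B (Python) =====
-- def iterRingCoordinates(size: int):
--     """Single pass over cell indices 0..n-1, decoding each index into its
--     ring coordinate arithmetically (alternative decomposition; same output)."""
--     last = size - 1
--     if size <= 0:
--         n = 0
--     elif size == 1:
--         n = 1
--     else:
--         n = 4 * last
--     for k in range(n):
--         if k < size:
--             yield (last, k)
--         elif k < 2 * last:
--             yield (2 * last - k, last)
--         elif k < 3 * last:
--             yield (0, 3 * last - k)
--         else:
--             yield (k - 3 * last, 0)
-- ===== Notes on version B (the rewrite author's own statement) =====
-- stated objective: alternative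
-- what changed: Replaces A's four sequential edge loops by a single loop over cell indices 0..n-1 that decodes each index into its ring coordinate with closed-form branch arithmetic.
import Mathlib
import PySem

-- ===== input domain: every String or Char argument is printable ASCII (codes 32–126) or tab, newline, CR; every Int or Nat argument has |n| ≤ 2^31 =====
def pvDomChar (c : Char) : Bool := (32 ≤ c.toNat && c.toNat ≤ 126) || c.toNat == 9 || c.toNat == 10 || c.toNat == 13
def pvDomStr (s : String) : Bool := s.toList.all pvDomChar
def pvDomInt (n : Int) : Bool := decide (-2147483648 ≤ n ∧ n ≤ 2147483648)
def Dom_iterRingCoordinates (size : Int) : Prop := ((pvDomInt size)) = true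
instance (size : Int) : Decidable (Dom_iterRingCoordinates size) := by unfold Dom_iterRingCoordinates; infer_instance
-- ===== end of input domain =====

-- B replaces A's four sequential edge loops by one loop over indices 0..n-1 decoded arithmetically (alternative decomposition, same cost).


-- ===== PORT A =====
-- four for-yield loops, each a map over its range
def iterRingCoordinates (size : Int) : List (Int × Int) :=
  (PySem.List.pyRange 0 size 1).map (fun col => (size - 1, col))
  ++ (PySem.List.pyRange (size - 1 - 1) (-1) (-1)).map (fun row => (row, size - 1))
  ++ (PySem.List.pyRange (size - 1 - 1) (-1) (-1)).map (fun col => ((0 : Int), col))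
  ++ (PySem.List.pyRange 1 (size - 1) 1).map (fun row => (row, (0 : Int)))

-- ===== PORT B =====
-- the number of boundary cells, then one loop decoding each index k into its coordinate
def iterRingCoordinates_alt (size : Int) : List (Int × Int) :=
  let last := size - 1
  let n : Int := if size ≤ 0 then 0 else if size = 1 then 1 else 4 * last
  (PySem.List.pyRange 0 n 1).map (fun k =>
    if k < size then (last, k)
    else if k < 2 * last then (2 * last - k, last)
    else if k < 3 * last then ((0 : Int), 3 * last - k)
    else (k - 3 * last, (0 : Int)))

-- ===== PRECONDITION & SPEC =====
def Spec_iterRingCoordinates (size : Int) (out : List (Int × Int)) : Prop := out = iterRingCoordinates_alt size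
instance (size : Int) (out : List (Int × Int)) : Decidable (Spec_iterRingCoordinates size out) := by unfold Spec_iterRingCoordinates; infer_instance

-- ===== CLAIM (what is proved, stated in full; the proofs are below) =====
def Claim_equal_iterRingCoordinates : Prop := ∀ (size : Int), Dom_iterRingCoordinates size → Spec_iterRingCoordinates size (iterRingCoordinates size)

-- ===== LEMMAS AND PROOFS =====

theorem iterRing_eq_of_two_le (size : Int) (h2 : 2 ≤ size) :
    iterRingCoordinates size = iterRingCoordinates_alt size := by
  unfold iterRingCoordinates iterRingCoordinates_alt
  have hns : ¬ size ≤ 0 := by omega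
  have hne : ¬ size = 1 := by omega
  simp only [hns, hne, if_false]
  -- split B's single range at the four corners (A's segment boundaries)
  rw [PySem.List.pyRange_one_append 0 size (4 * (size - 1)) (by omega) (by omega),
      PySem.List.pyRange_one_append size (2 * (size - 1) + 1) (4 * (size - 1)) (by omega) (by omega),
      PySem.List.pyRange_one_append (2 * (size - 1) + 1) (3 * (size - 1) + 1) (4 * (size - 1)) (by omega) (by omega)]
  simp only [List.map_append, List.append_assoc]
  -- rewrite every range as List.range of a Nat
  rw [PySem.List.pyRange_one 0 size, PySem.List.pyRange_one size (2 * (size - 1) + 1),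
      PySem.List.pyRange_one (2 * (size - 1) + 1) (3 * (size - 1) + 1),
      PySem.List.pyRange_one (3 * (size - 1) + 1) (4 * (size - 1)),
      PySem.List.pyRange_one 1 (size - 1),
      PySem.List.pyRange_neg_one (size - 1 - 1) (-1)]
  simp only [List.map_map]
  have e1 : (2 * (size - 1) + 1 - size) = size - 1 - 1 - -1 := by ring
  have e2 : (3 * (size - 1) + 1 - (2 * (size - 1) + 1)) = size - 1 - 1 - -1 := by ring
  have e3 : (4 * (size - 1) - (3 * (size - 1) + 1)) = size - 1 - 1 := by ring
  rw [e1, e2, e3]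
  congr 1
  · -- bottom row
    apply List.map_congr_left
    intro k hk
    rw [List.mem_range] at hk
    have hk' : (k : Int) < size - 0 := by
      have := Int.toNat_of_nonneg (a := size - 0) (by omega)
      omega
    simp only [Function.comp_apply]
    rw [if_pos (by omega)]
  congr 1
  · -- right column
    apply List.map_congr_left
    intro k hk
    rw [List.mem_range] at hk
    have hk' : (k : Int) < size - 1 - 1 - -1 := by
      have := Int.toNat_of_nonneg (a := size - 1 - 1 - -1) (by omega)
      omega
    simp only [Function.comp_apply]
    rw [if_neg (by omega)]
    by_cases hc : (size : Int) + k < 2 * (size - 1)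
    · rw [if_pos hc]
      rw [Prod.mk.injEq]; constructor <;> omega
    · rw [if_neg hc, if_pos (by omega)]
      rw [Prod.mk.injEq]; constructor <;> omega
  congr 1
  · -- top row
    apply List.map_congr_left
    intro k hk
    rw [List.mem_range] at hk
    have hk' : (k : Int) < size - 1 - 1 - -1 := by
      have := Int.toNat_of_nonneg (a := size - 1 - 1 - -1) (by omega)
      omega
    simp only [Function.comp_apply]
    rw [if_neg (by omega), if_neg (by omega)]
    by_cases hc : 2 * (size - 1) + 1 + (k : Int) < 3 * (size - 1)
    · rw [if_pos hc]
      rw [Prod.mk.injEq]; constructor <;> omega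
    · rw [if_neg hc]
      rw [Prod.mk.injEq]; constructor <;> omega
  · -- left column
    apply List.map_congr_left
    intro k hk
    rw [List.mem_range] at hk
    have hk' : (k : Int) < size - 1 - 1 := by
      have := Int.toNat_of_nonneg (a := size - 1 - 1) (by omega)
      omega
    simp only [Function.comp_apply]
    rw [if_neg (by omega), if_neg (by omega), if_neg (by omega)]
    rw [Prod.mk.injEq]; constructor <;> omega

-- ===== VERDICT (by name: the statement is the Claim_ definition above) =====
theorem iterRingCoordinates_spec : Claim_equal_iterRingCoordinates := by
  intro size _
  unfold Spec_iterRingCoordinates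
  rcases lt_trichotomy size 1 with h | h | h
  · -- size ≤ 0: every range empty on both sides
    unfold iterRingCoordinates iterRingCoordinates_alt
    simp [show size ≤ (0:Int) by omega, PySem.List.pyRange_one_eq_nil (by omega : size ≤ (0:Int)),
          PySem.List.pyRange_one_eq_nil (by omega : size - 1 ≤ (1:Int)),
          PySem.List.pyRange_neg_one_eq_nil (by omega : size - 1 - 1 ≤ (-1:Int))]
  · subst h; decide
  · exact iterRing_eq_of_two_le size (by omega)
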